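-- pv_equiv track=rewrite | github.com/valik94/PythonProblems | labs109.py | highest_n_scores
-- ===== SOURCE A (Python) =====
-- def highest_n_scores(scores, n = 5):
--     totals = {}
--     for (name, score) in scores:
--         if name in totals:
--             totals[name].append(score)
--         else:
--             totals[name] = [score]
--     result = []
--     for name in totals:
--         s = totals[name]
--         if len(s) > n:
--             s = list(sorted(s))[-n:]
--         result.append((name, sum(s)))
--     result.sort()
--     return result
-- ===== SOURCE B (Python) =====
-- def highest_n_scores(scores, n = 5):
--     ordered = sorted(scores)
--     result = []
--     i, m = 0, len(ordered)
--     while i < m: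
--         name = ordered[i][0]
--         j = i
--         while j < m and ordered[j][0] == name:
--             j += 1
--         vals = [score for _, score in ordered[i:j]]
--         result.append((name, sum(vals[-n:])))
--         i = j
--     return result
-- ===== Notes on version B (the rewrite author's own statement) =====
-- stated objective: alternative
-- what changed: Replaces the dict-of-lists grouping plus per-name sort and final result.sort() by one global sort of the whole scores list followed by a single linear grouping sweep (each name's scores come out already ascending and in name order, so no per-group sort and no final sort are needed).
import Mathlib
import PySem

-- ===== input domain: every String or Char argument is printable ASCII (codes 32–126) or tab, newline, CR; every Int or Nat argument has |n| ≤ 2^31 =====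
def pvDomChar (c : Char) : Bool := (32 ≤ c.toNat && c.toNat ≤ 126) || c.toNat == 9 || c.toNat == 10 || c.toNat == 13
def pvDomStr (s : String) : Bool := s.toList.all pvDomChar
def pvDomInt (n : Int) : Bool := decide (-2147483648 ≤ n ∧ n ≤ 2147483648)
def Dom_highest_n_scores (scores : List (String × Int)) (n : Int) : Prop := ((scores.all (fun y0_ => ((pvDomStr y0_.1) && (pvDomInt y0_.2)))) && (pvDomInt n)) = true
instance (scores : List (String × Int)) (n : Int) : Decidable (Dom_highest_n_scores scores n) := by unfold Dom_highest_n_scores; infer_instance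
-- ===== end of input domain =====

-- B replaces A's dict-of-lists grouping + per-name sort + final result.sort() by one global
-- sort of the scores list followed by a single linear grouping sweep (objective: alternative).

-- ===== PORT A =====
def highest_n_scores (scores : List (String × Int)) (n : Int) : List (String × Int) :=
  let totals := scores.foldl
    (fun d p =>
      if d.contains p.1 then d.modify p.1 [] (fun l => l ++ [p.2])
      else d.insert p.1 [p.2])
    PySem.Dict.empty
  let result := totals.keys.foldl
    (fun r name =>
      let s := totals.getD name []
      let s := if n < (s.length : Int) then
          PySem.List.slice (PySem.List.sorted s (fun x => x) false) (some (-n)) none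
        else s
      r ++ [(name, s.sum)])
    []
  PySem.List.sorted2 result (fun p => p.1) (fun p => p.2) false

-- ===== PORT B =====
-- one linear sweep over the globally sorted list: the inner j-scan of Source B is the
-- takeWhile/dropWhile split of the run of equal names
def pvGroupRuns (n : Int) : List (String × Int) → List (String × Int)
  | [] => []
  | (name, s) :: rest =>
    let vals := s :: (rest.takeWhile (fun q => q.1 == name)).map (fun q => q.2)
    (name, (PySem.List.slice vals (some (-n)) none).sum)
      :: pvGroupRuns n (rest.dropWhile (fun q => q.1 == name))
termination_by l => l.length
decreasing_by
  simp only [List.length_cons]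
  have := List.length_dropWhile_le (fun q => q.1 == name) rest
  omega

def highest_n_scores_alt (scores : List (String × Int)) (n : Int) : List (String × Int) :=
  pvGroupRuns n (PySem.List.sorted2 scores (fun p => p.1) (fun p => p.2) false)

-- ===== PRECONDITION & SPEC =====
def Spec_highest_n_scores (scores : List (String × Int)) (n : Int) (out : List (String × Int)) : Prop := out = highest_n_scores_alt scores n
instance (scores : List (String × Int)) (n : Int) (out : List (String × Int)) : Decidable (Spec_highest_n_scores scores n out) := by unfold Spec_highest_n_scores; infer_instance

-- ===== CLAIM (what is proved, stated in full; the proofs are below) =====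
def Claim_equal_highest_n_scores : Prop := ∀ (scores : List (String × Int)) (n : Int), Dom_highest_n_scores scores n → Spec_highest_n_scores scores n (highest_n_scores scores n)

-- ===== LEMMAS AND PROOFS =====

-- Python's lexicographic ≤ on (name, score) pairs, and the strict comparison sorted2 uses
def pvLexLe (a b : String × Int) : Prop := a.1 < b.1 ∨ (a.1 = b.1 ∧ a.2 ≤ b.2)

def pvBef (a b : String × Int) : Bool :=
  decide (a.1 < b.1) || (!decide (b.1 < a.1) && decide (a.2 < b.2))

-- the total a name contributes, read off a (sorted) list l
def pvTot (l : List (String × Int)) (n : Int) (k : String) : Int :=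
  (PySem.List.slice ((l.filter (fun p => p.1 == k)).map (fun p => p.2)) (some (-n)) none).sum

lemma pvLexLe_trans {a b c : String × Int} (h1 : pvLexLe a b) (h2 : pvLexLe b c) : pvLexLe a c := by
  rcases h1 with h1 | ⟨h1, h1'⟩ <;> rcases h2 with h2 | ⟨h2, h2'⟩
  · exact Or.inl (lt_trans h1 h2)
  · exact Or.inl (h2 ▸ h1)
  · exact Or.inl (h1 ▸ h2)
  · exact Or.inr ⟨h1.trans h2, le_trans h1' h2'⟩

lemma pvBef_true {a b : String × Int} (h : pvBef a b = true) : pvLexLe a b := by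
  simp only [pvBef, Bool.or_eq_true, Bool.and_eq_true, Bool.not_eq_true', decide_eq_true_eq,
    decide_eq_false_iff_not] at h
  rcases h with h | ⟨h1, h2⟩
  · exact Or.inl h
  · rcases lt_or_eq_of_le (not_lt.mp h1) with h3 | h3
    · exact Or.inl h3
    · exact Or.inr ⟨h3, le_of_lt h2⟩

lemma pvBef_false {a b : String × Int} (h : pvBef a b = false) : pvLexLe b a := by
  simp only [pvBef, Bool.or_eq_false_iff, Bool.and_eq_false_iff, Bool.not_eq_false',
    decide_eq_true_eq, decide_eq_false_iff_not] at h
  obtain ⟨h1, h2⟩ := h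
  by_cases hba : b.1 < a.1
  · exact Or.inl hba
  · have heq : b.1 = a.1 := le_antisymm (not_lt.mp h1) (not_lt.mp hba)
    rcases h2 with h2 | h2
    · exact absurd h2 hba
    · exact Or.inr ⟨heq, not_lt.mp h2⟩

lemma pvLexLe_antisymm {a b : String × Int} (h1 : pvLexLe a b) (h2 : pvLexLe b a) : a = b := by
  rcases h1 with h1 | ⟨h1, h1'⟩ <;> rcases h2 with h2 | ⟨h2, h2'⟩
  · exact absurd h2 (lt_asymm h1)
  · exact absurd h1 (h2 ▸ lt_irrefl _)
  · exact absurd h2 (h1 ▸ lt_irrefl _)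
  · exact Prod.ext h1 (le_antisymm h1' h2')

lemma pvInsertBy_pairwise (x : String × Int) :
    ∀ (acc : List (String × Int)), acc.Pairwise pvLexLe →
      (PySem.List.insertBy pvBef x acc).Pairwise pvLexLe
  | [], _ => by
    rw [show PySem.List.insertBy pvBef x [] = [x] from rfl]
    exact List.pairwise_singleton _ _
  | y :: ys, hp => by
    obtain ⟨hy, hys⟩ := List.pairwise_cons.mp hp
    rw [show PySem.List.insertBy pvBef x (y :: ys)
        = if pvBef x y then x :: y :: ys else y :: PySem.List.insertBy pvBef x ys from rfl]
    split_ifs with h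
    · refine List.pairwise_cons.mpr ⟨?_, hp⟩
      intro z hz
      rcases List.mem_cons.mp hz with rfl | hz
      · exact pvBef_true h
      · exact pvLexLe_trans (pvBef_true h) (hy z hz)
    · refine List.pairwise_cons.mpr ⟨?_, pvInsertBy_pairwise x ys hys⟩
      intro z hz
      rcases (PySem.List.insertBy_mem_iff pvBef x z ys).mp hz with rfl | hz
      · exact pvBef_false (Bool.not_eq_true _ ▸ h)
      · exact hy z hz

lemma pvFoldl_insert_pairwise :
    ∀ (xs acc : List (String × Int)), acc.Pairwise pvLexLe →
      (xs.foldl (fun acc x => PySem.List.insertBy pvBef x acc) acc).Pairwise pvLexLe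
  | [], _, h => h
  | x :: xs, acc, h => pvFoldl_insert_pairwise xs _ (pvInsertBy_pairwise x acc h)

lemma pvSorted2_pairwise (xs : List (String × Int)) :
    (PySem.List.sorted2 xs (fun p => p.1) (fun p => p.2) false).Pairwise pvLexLe := by
  rw [show PySem.List.sorted2 xs (fun p => p.1) (fun p => p.2) false
      = xs.foldl (fun acc x => PySem.List.insertBy pvBef x acc) [] from rfl]
  exact pvFoldl_insert_pairwise xs [] List.Pairwise.nil

-- the grouping sweep on a lexicographically ordered list: its entries are exactly
-- (k, pvTot l n k) for the distinct names k of l, and names come out strictly increasing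
lemma pvGroup_spec (n : Int) :
    ∀ (N : Nat) (l : List (String × Int)), l.length ≤ N → l.Pairwise pvLexLe →
      (∀ x ∈ pvGroupRuns n l, x.1 ∈ l.map (fun p => p.1) ∧ x = (x.1, pvTot l n x.1)) ∧
      (∀ k ∈ l.map (fun p => p.1), (k, pvTot l n k) ∈ pvGroupRuns n l) ∧
      (pvGroupRuns n l).Pairwise (fun a b => a.1 < b.1) := by
  intro N
  induction N with
  | zero =>
    intro l hl _
    have : l = [] := List.eq_nil_of_length_eq_zero (Nat.le_zero.mp hl)
    subst this
    simp [pvGroupRuns]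
  | succ N IH =>
    intro l hl hp
    match l with
    | [] => simp [pvGroupRuns]
    | (name, s) :: rest =>
      obtain ⟨hhd, hrest⟩ := List.pairwise_cons.mp hp
      have htr : rest.takeWhile (fun q => q.1 == name) ++ rest.dropWhile (fun q => q.1 == name) = rest :=
        List.takeWhile_append_dropWhile
      set t := rest.takeWhile (fun q => q.1 == name) with ht
      set r := rest.dropWhile (fun q => q.1 == name) with hrr
      have hT : ∀ p ∈ t, p.1 = name := fun p hp' => by
        have := List.mem_takeWhile_imp hp'
        simpa using this
      have hR : ∀ p ∈ r, name < p.1 := by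
        cases hr : r with
        | nil => simp
        | cons h r' =>
          have hsub : (h :: r').Sublist rest := hr ▸ hrr ▸ List.dropWhile_sublist _
          have hh_mem : h ∈ rest := hsub.subset (List.mem_cons_self)
          have hPh : (h.1 == name) = false := by
            have := List.head?_dropWhile_not (fun q => q.1 == name) rest
            rw [← hrr, hr] at this
            simpa using this
          have hne : h.1 ≠ name := by simpa using hPh
          have hh1 : name < h.1 := by
            rcases hhd h hh_mem with hlt | ⟨heq, _⟩
            · exact hlt
            · exact absurd heq.symm hne
          intro p hp'
          rcases List.mem_cons.mp hp' with rfl | hp'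
          · exact hh1
          · have hpair : (h :: r').Pairwise pvLexLe := List.Pairwise.sublist hsub hrest
            rcases (List.pairwise_cons.mp hpair).1 p hp' with hlt | ⟨heq, _⟩
            · exact lt_trans hh1 hlt
            · exact heq ▸ hh1
      have hfilt_t : t.filter (fun p => p.1 == name) = t :=
        List.filter_eq_self.mpr (fun p hp' => by simp [hT p hp'])
      have hfilt_r : ∀ k, name < k → r.filter (fun p => p.1 == k) = r.filter (fun p => p.1 == k) := fun _ _ => rfl
      have hfilt_r_name : r.filter (fun p => p.1 == name) = [] :=
        List.filter_eq_nil_iff.mpr (fun p hp' => by simp [ne_of_gt (hR p hp')])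
      have hfilter_name : (((name, s) :: rest).filter (fun p => p.1 == name)) = (name, s) :: t := by
        rw [← htr]
        simp only [List.filter_cons, List.filter_append, beq_self_eq_true]
        rw [hfilt_t, hfilt_r_name, List.append_nil]
        rfl
      have hfilt_t_k : ∀ k, k ≠ name → t.filter (fun p => p.1 == k) = [] := fun k hk =>
        List.filter_eq_nil_iff.mpr (fun p hp' => by simp [hT p hp', Ne.symm hk])
      have hfilter_k : ∀ k, k ≠ name →
          (((name, s) :: rest).filter (fun p => p.1 == k)) = r.filter (fun p => p.1 == k) := by
        intro k hk
        rw [← htr]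
        have hhead : (((name, s).1 == k)) = false := by
          simpa using fun h : name = k => hk h.symm
        simp only [List.filter_cons, List.filter_append, hhead, Bool.false_eq_true,
          if_false, hfilt_t_k k hk, List.nil_append]
      have hlen : t.length + r.length = rest.length := by
        have := congrArg List.length htr
        simpa using this
      have hrlen : r.length ≤ N := by
        have : rest.length + 1 ≤ N + 1 := by simpa using hl
        omega
      have hrp : r.Pairwise pvLexLe := List.Pairwise.sublist (hrr ▸ List.dropWhile_sublist _) hrest
      obtain ⟨IH1, IH2, IH3⟩ := IH r hrlen hrp
      have hrsub : ∀ p ∈ r, p ∈ rest := fun p hp' => (hrr ▸ List.dropWhile_sublist _ : r.Sublist rest).subset hp'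
      have hTotLift : ∀ k, k ≠ name → pvTot r n k = pvTot ((name, s) :: rest) n k := by
        intro k hk
        unfold pvTot
        rw [hfilter_k k hk]
      have hunfold : pvGroupRuns n ((name, s) :: rest)
          = (name, (PySem.List.slice (s :: t.map (fun q => q.2)) (some (-n)) none).sum)
            :: pvGroupRuns n r := by
        rw [pvGroupRuns]
      have hheadval : (PySem.List.slice (s :: t.map (fun q => q.2)) (some (-n)) none).sum
          = pvTot ((name, s) :: rest) n name := by
        unfold pvTot
        rw [hfilter_name]
        rfl
      refine ⟨?_, ?_, ?_⟩
      · intro x hx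
        rw [hunfold] at hx
        rcases List.mem_cons.mp hx with rfl | hx
        · exact ⟨by simp, by rw [hheadval]⟩
        · obtain ⟨hx1, hx2⟩ := IH1 x hx
          obtain ⟨p, hpr, hpx⟩ := List.mem_map.mp hx1
          have hkne : x.1 ≠ name := hpx ▸ ne_of_gt (hR p hpr)
          refine ⟨?_, ?_⟩
          · exact List.mem_map.mpr ⟨p, List.mem_cons_of_mem _ (hrsub p hpr), hpx⟩
          · rw [hx2, ← hTotLift x.1 hkne]
      · intro k hk
        rcases List.mem_map.mp hk with ⟨p, hpl, hpk⟩
        rcases List.mem_cons.mp hpl with rfl | hpl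
        · subst hpk
          rw [hunfold, hheadval]
          exact List.mem_cons_self
        · rw [← htr] at hpl
          rcases List.mem_append.mp hpl with hpt | hpr
          · obtain rfl : k = name := hpk.symm.trans (hT p hpt)
            rw [hunfold, hheadval]
            exact List.mem_cons_self
          · have hkr : k ∈ r.map (fun p => p.1) := List.mem_map.mpr ⟨p, hpr, hpk⟩
            have hkne : k ≠ name := by rw [← hpk]; exact ne_of_gt (hR p hpr)
            have := IH2 k hkr
            rw [hTotLift k hkne] at this
            rw [hunfold]
            exact List.mem_cons_of_mem _ this
      · rw [hunfold]
        refine List.pairwise_cons.mpr ⟨?_, IH3⟩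
        intro y hy
        obtain ⟨hy1, _⟩ := IH1 y hy
        obtain ⟨p, hpr, hpy⟩ := List.mem_map.mp hy1
        exact hpy ▸ hR p hpr

-- per-name value of A's branch equals pvTot read off the globally sorted list
lemma pvBranch (scores : List (String × Int)) (n : Int) (k : String) :
    (if n < (((scores.filter (fun p => p.1 == k)).map (fun p => p.2)).length : Int) then
        PySem.List.slice
          (PySem.List.sorted ((scores.filter (fun p => p.1 == k)).map (fun p => p.2)) (fun x => x) false)
          (some (-n)) none
      else (scores.filter (fun p => p.1 == k)).map (fun p => p.2)).sum
    = pvTot (PySem.List.sorted2 scores (fun p => p.1) (fun p => p.2) false) n k := by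
  set lS := PySem.List.sorted2 scores (fun p => p.1) (fun p => p.2) false with hlS
  set sA := (scores.filter (fun p => p.1 == k)).map (fun p => p.2) with hsA
  set w := (lS.filter (fun p => p.1 == k)).map (fun p => p.2) with hw
  have hperm : w.Perm sA :=
    ((PySem.List.sorted2_perm scores (fun p => p.1) (fun p => p.2) false).filter _).map _
  have hpairf : (lS.filter (fun p => p.1 == k)).Pairwise pvLexLe :=
    List.Pairwise.sublist List.filter_sublist (pvSorted2_pairwise scores)
  have hpair2 : (lS.filter (fun p => p.1 == k)).Pairwise (fun a b => a.2 ≤ b.2) := by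
    refine hpairf.imp_of_mem ?_
    intro a b ha hb hr
    have ha1 : a.1 = k := by simpa using List.of_mem_filter ha
    have hb1 : b.1 = k := by simpa using List.of_mem_filter hb
    rcases hr with hlt | ⟨_, hle⟩
    · rw [ha1, hb1] at hlt
      exact absurd hlt (lt_irrefl k)
    · exact hle
  have hpair : w.Pairwise (fun a b => a ≤ b) := hpair2.map _ (fun _ _ h => h)
  have hsorted : PySem.List.sorted sA (fun x => x) = w :=
    PySem.List.sorted_id_eq_of_perm_of_pairwise sA w hperm hpair
  by_cases hn : n < (sA.length : Int)
  · rw [if_pos hn, hsorted]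
    rfl
  · rw [if_neg hn]
    have h0 : (0 : Int) ≤ n := le_trans (Int.natCast_nonneg sA.length) (not_lt.mp hn)
    have hlenw : w.length = sA.length := hperm.length_eq
    have hslice : PySem.List.slice w (some (-n)) none = w := by
      rw [PySem.List.slice_some_none]
      have hzero : PySem.List.clampIdx w.length (-n) = 0 := by
        obtain ⟨m, rfl⟩ : ∃ m : Nat, n = (m : Int) := ⟨n.toNat, (Int.toNat_of_nonneg h0).symm⟩
        cases m with
        | zero =>
          have h00 := PySem.List.clampIdx_natCast w.length 0
          simp only [Nat.cast_zero, neg_zero] at h00 ⊢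
          rw [h00]
          exact Nat.zero_min _
        | succ m' =>
          rw [PySem.List.clampIdx_neg_natCast w.length (m' + 1) (Nat.succ_pos m')]
          have : sA.length ≤ m' + 1 := by exact_mod_cast not_lt.mp hn
          omega
      rw [hzero, List.drop_zero]
    show sA.sum = pvTot lS n k
    unfold pvTot
    rw [← hw, hslice]
    exact hperm.sum_eq.symm

-- A's whole computation, rewritten as a sort of the per-name totals over the key set
lemma pvA_eq (scores : List (String × Int)) (n : Int) :
    highest_n_scores scores n
      = PySem.List.sorted2
          ((PySem.Set.ofList (scores.map (fun p => p.1))).map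
            (fun k => (k, pvTot (PySem.List.sorted2 scores (fun p => p.1) (fun p => p.2) false) n k)))
          (fun p => p.1) (fun p => p.2) false := by
  unfold highest_n_scores
  have hstep : (fun (d : PySem.Dict String (List Int)) (p : String × Int) =>
      if d.contains p.1 then d.modify p.1 [] (fun l => l ++ [p.2]) else d.insert p.1 [p.2])
      = fun (d : PySem.Dict String (List Int)) (p : String × Int) =>
          d.modify p.1 [] (fun l => l ++ [p.2]) := by
    funext d p
    by_cases h : d.contains p.1
    · simp [h]
    · rw [if_neg h]
      have hc : d.contains p.1 = false := by simpa using h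
      simp [PySem.Dict.modify, PySem.Dict.getD_of_not_contains d _ hc]
  simp only [hstep]
  set totals := scores.foldl
      (fun (d : PySem.Dict String (List Int)) (p : String × Int) =>
        d.modify p.1 [] (fun l => l ++ [p.2])) PySem.Dict.empty with htotals
  have hkeys : totals.keys = PySem.Set.ofList (scores.map (fun p => p.1)) := by
    rw [htotals, PySem.Dict.keys_foldl_modify_key scores (fun p => p.1) []
      (fun _ x => fun l => l ++ [x.2]) PySem.Dict.empty, PySem.Dict.keys_empty,
      PySem.Set.update_nil_left]
  have hgetD : ∀ k, totals.getD k [] = (scores.filter (fun p => p.1 == k)).map (fun p => p.2) := by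
    intro k
    rw [htotals, PySem.Dict.getD_foldl_modify_append scores PySem.Dict.empty k,
      PySem.Dict.getD_empty, List.nil_append]
  rw [PySem.List.foldl_append_singleton_eq_map
    (fun name => (name, (if n < ((totals.getD name []).length : Int) then
        PySem.List.slice (PySem.List.sorted (totals.getD name []) (fun x => x) false) (some (-n)) none
      else totals.getD name []).sum)) totals.keys []]
  rw [List.nil_append, hkeys]
  congr 1
  apply List.map_congr_left
  intro k _
  rw [hgetD k]
  rw [pvBranch scores n k]

-- ===== VERDICT (by name: the statement is the Claim_ definition above) =====
theorem highest_n_scores_spec : Claim_equal_highest_n_scores := by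
  intro scores n _hdom
  show highest_n_scores scores n = highest_n_scores_alt scores n
  set lS := PySem.List.sorted2 scores (fun p => p.1) (fun p => p.2) false with hlS
  set K := PySem.Set.ofList (scores.map (fun p => p.1)) with hK
  set g : String → String × Int := fun k => (k, pvTot lS n k) with hg
  have hA : highest_n_scores scores n
      = PySem.List.sorted2 (K.map g) (fun p => p.1) (fun p => p.2) false := pvA_eq scores n
  have hB : highest_n_scores_alt scores n = pvGroupRuns n lS := rfl
  obtain ⟨hi, hii, hiii⟩ := pvGroup_spec n lS.length lS (le_refl _) (pvSorted2_pairwise scores)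
  have hinj : Function.Injective g := fun a b h => congrArg Prod.fst h
  have hKnd : (K.map g).Nodup := (PySem.Set.nodup_ofList _).map hinj
  have hLnd : (pvGroupRuns n lS).Nodup :=
    hiii.imp (fun {a b} h => by intro he; rw [he] at h; exact lt_irrefl _ h)
  have hperm_fst : (lS.map (fun p => p.1)).Perm (scores.map (fun p => p.1)) :=
    (PySem.List.sorted2_perm scores (fun p => p.1) (fun p => p.2) false).map _
  have hmem : ∀ x, x ∈ pvGroupRuns n lS ↔ x ∈ K.map g := by
    intro x
    constructor
    · intro hx
      obtain ⟨hx1, hx2⟩ := hi x hx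
      refine List.mem_map.mpr ⟨x.1, ?_, hx2.symm⟩
      exact (PySem.Set.mem_ofList _ _).mpr (hperm_fst.mem_iff.mp hx1)
    · intro hx
      obtain ⟨k, hk, rfl⟩ := List.mem_map.mp hx
      have hk' : k ∈ lS.map (fun p => p.1) :=
        hperm_fst.mem_iff.mpr ((PySem.Set.mem_ofList _ _).mp hk)
      exact hii k hk'
  have hperm : (pvGroupRuns n lS).Perm (K.map g) :=
    (List.perm_ext_iff_of_nodup hLnd hKnd).mpr hmem
  rw [hA, hB]
  refine List.Perm.eq_of_pairwise (le := pvLexLe)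
    (fun a b _ _ h1 h2 => pvLexLe_antisymm h1 h2)
    (pvSorted2_pairwise (K.map g))
    (hiii.imp (fun {a b} h => Or.inl h))
    ((PySem.List.sorted2_perm (K.map g) (fun p => p.1) (fun p => p.2) false).trans hperm.symm)
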